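-- pv_equiv track=rewrite | github.com/hegde95/AdaptivePolicyLearning | plot_utils/ddpg_plotter.py | get_capacity
-- ===== SOURCE A (Python) =====
-- def get_capacity (net, inp, out):
--     C = 0
--     C = (inp + 2)*net[0]
--     smallest_layer = net[0]
--     for l in net[1:]:
--         if l < smallest_layer:
--             smallest_layer = l
--         C += smallest_layer
--     if out<smallest_layer:
--         smallest_layer = out
--     C+= smallest_layer
--     return C
-- ===== SOURCE B (Python) =====
-- def get_capacity(net, inp, out):
--     # Per-index brute force: each prefix minimum recomputed from scratch with min(),
--     # no running state carried between iterations (unlike A's accumulator loop).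
--     body = sum(min(net[:i + 1]) for i in range(1, len(net)))
--     return (inp + 2) * net[0] + body + min(min(net), out)
-- ===== Notes on version B (the rewrite author's own statement) =====
-- stated objective: simpler
-- what changed: A maintains a running minimum and a capacity accumulator interleaved in one stateful loop; B carries no state at all and recomputes each prefix minimum independently with the builtin min(net[:i+1]), summing them directly (brute force, O(n^2)) and closing with min(min(net), out).
import Mathlib
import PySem

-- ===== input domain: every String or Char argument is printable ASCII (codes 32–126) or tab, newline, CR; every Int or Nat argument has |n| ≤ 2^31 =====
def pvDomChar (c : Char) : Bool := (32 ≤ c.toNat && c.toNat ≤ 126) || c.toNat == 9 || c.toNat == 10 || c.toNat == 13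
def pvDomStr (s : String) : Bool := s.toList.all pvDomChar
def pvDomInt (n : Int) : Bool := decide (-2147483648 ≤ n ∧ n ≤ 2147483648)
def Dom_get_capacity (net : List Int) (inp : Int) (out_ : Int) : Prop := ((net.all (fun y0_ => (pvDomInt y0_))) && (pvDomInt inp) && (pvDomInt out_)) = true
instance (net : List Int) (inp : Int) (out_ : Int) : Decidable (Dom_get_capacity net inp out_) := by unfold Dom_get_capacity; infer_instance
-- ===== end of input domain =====

-- B drops A's interleaved stateful loop: it recomputes each prefix minimum from scratch with min(net[:i+1]) and sums them (brute force); objective: simpler.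


-- ===== PORT A =====
-- loop state: (C, smallest_layer)
def stepA (p : Int × Int) (l : Int) : Int × Int :=
  let s := if l < p.2 then l else p.2
  (p.1 + s, s)

def get_capacity (net : List Int) (inp : Int) (out_ : Int) : Int :=
  match net with
  | [] => 0  -- Python raises IndexError here (net[0]); excluded by Pre_
  | n0 :: rest =>
    let r := rest.foldl stepA ((inp + 2) * n0, n0)
    let s := if out_ < r.2 then out_ else r.2
    r.1 + s

-- ===== PORT B =====
-- Python's builtin min of a nonempty list (every list B applies it to is nonempty)
def pymin (l : List Int) : Int :=
  match l with
  | [] => 0  -- Python min([]) raises; never reached by B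
  | x :: xs => xs.foldl min x

def get_capacity_alt (net : List Int) (inp : Int) (out_ : Int) : Int :=
  match net with
  | [] => 0  -- Python raises IndexError here (net[0]); excluded by Pre_
  | n0 :: _ =>
    let body := (PySem.List.pyRange 1 (net.length : Int) 1).foldl
      (fun acc i => acc + pymin (PySem.List.slice net none (some (i + 1)))) 0
    (inp + 2) * n0 + body + min (pymin net) out_

-- ===== PRECONDITION & SPEC =====
-- Pre_ excludes exactly the empty net, on which both Pythons raise IndexError (net[0]).
def Pre_get_capacity (net : List Int) (inp : Int) (out_ : Int) : Prop := net ≠ []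
instance (net : List Int) (inp : Int) (out_ : Int) : Decidable (Pre_get_capacity net inp out_) := by unfold Pre_get_capacity; infer_instance

def pvWitness_get_capacity : List Int × Int × Int := ([4, 3, 5], 2, 1)

def Spec_get_capacity (net : List Int) (inp : Int) (out_ : Int) (out : Int) : Prop := out = get_capacity_alt net inp out_
instance (net : List Int) (inp : Int) (out_ : Int) (out : Int) : Decidable (Spec_get_capacity net inp out_ out) := by unfold Spec_get_capacity; infer_instance

-- ===== CLAIM =====
def Claim_equal_get_capacity : Prop := ∀ (net : List Int) (inp : Int) (out_ : Int), Dom_get_capacity net inp out_ → Pre_get_capacity net inp out_ → Spec_get_capacity net inp out_ (get_capacity net inp out_)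

-- ===== LEMMAS AND PROOFS =====

-- A's running minimum is the fold of min
theorem foldA_snd (t : List Int) (C c : Int) :
    (t.foldl stepA (C, c)).2 = t.foldl min c := by
  induction t generalizing C c with
  | nil => rfl
  | cons l t ih =>
    simp only [List.foldl, stepA, ih]
    congr 1
    simp only [min_def]; split_ifs <;> omega

-- A's accumulator equals the initial value plus the sum of the prefix minima of t (from c)
theorem foldA_fst (t : List Int) (C c : Int) :
    (t.foldl stepA (C, c)).1
      = C + ((List.range t.length).map (fun k => (t.take (k + 1)).foldl min c)).sum := by
  induction t generalizing C c with
  | nil => simp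
  | cons l t ih =>
    simp only [List.foldl, stepA]
    rw [ih]
    have hs : (if l < c then l else c) = min c l := by
      simp only [min_def]; split_ifs <;> omega
    simp only [hs, List.length_cons, List.range_succ_eq_map, List.map_cons, List.map_map,
      List.sum_cons, List.take_succ_cons, List.foldl_cons, List.take_zero, List.foldl_nil]
    ring_nf
    congr 1
    refine congrArg List.sum (List.map_congr_left ?_)
    intro a _
    simp [Nat.add_comm]

theorem pymin_cons_take (n0 : Int) (rest : List Int) (k : ℕ) :
    pymin ((n0 :: rest).take (k + 1 + 1)) = (rest.take (k + 1)).foldl min n0 := by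
  simp [pymin]

-- ===== VERDICT =====
theorem get_capacity_spec : Claim_equal_get_capacity := by
  intro net inp out_ _ hpre
  unfold Spec_get_capacity
  match net with
  | [] => exact absurd rfl hpre
  | n0 :: rest =>
    simp only [get_capacity, get_capacity_alt]
    rw [foldA_fst, foldA_snd]
    have hrange : PySem.List.pyRange 1 ((n0 :: rest).length : Int) 1
        = (List.range rest.length).map (fun (k : ℕ) => (1 : Int) + (k : Int)) := by
      rw [PySem.List.pyRange_one]
      have : ((((n0 :: rest).length : Int) - 1).toNat) = rest.length := by
        simp only [List.length_cons]; omega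
      rw [this]
    rw [hrange, List.foldl_map]
    have hfold : ∀ (init : Int),
        (List.range rest.length).foldl
          (fun acc (k : ℕ) => acc + pymin (PySem.List.slice (n0 :: rest) none (some ((1 : Int) + (k : Int) + 1)))) init
        = init + ((List.range rest.length).map (fun k => (rest.take (k + 1)).foldl min n0)).sum := by
      intro init
      induction rest.length generalizing init with
      | zero => simp
      | succ m ih =>
        rw [List.range_succ, List.foldl_append, List.map_append, List.sum_append, ih]
        have h1 : (1 : Int) + m + 1 = ((m + 2 : ℕ) : Int) := by push_cast; ring
        simp only [List.foldl_cons, List.foldl_nil, List.map_cons, List.map_nil, List.sum_cons,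
          List.sum_nil, h1, PySem.List.slice_to_natCast]
        rw [pymin_cons_take n0 rest m]
        ring
    rw [hfold]
    have hmin : pymin (n0 :: rest) = rest.foldl min n0 := by simp [pymin]
    have hout : (if out_ < rest.foldl min n0 then out_ else rest.foldl min n0)
        = min (pymin (n0 :: rest)) out_ := by
      rw [hmin]; simp only [min_def]; split_ifs <;> omega
    rw [hout]
    ring
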